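-- pv_equiv track=rewrite | github.com/jmrbexp/p21_odp_checksum_calculator | type_conversions.py | convert_modbus_list_of_u8s_to_memory_representation
-- ===== SOURCE A (Python) =====
-- def convert_modbus_list_of_u8s_to_memory_representation(modbus_list):
--     memory_list = []
--     this_index = 0
--     while this_index < len(modbus_list)-1: #-1 because we do this in pairs of bytes, so we ignore odd bytes at the end
--         memory_list.append(modbus_list[this_index+1])
--         memory_list.append(modbus_list[this_index])
--         this_index += 2
--     return memory_list
-- ===== SOURCE B (Python) =====
-- def convert_modbus_list_of_u8s_to_memory_representation(modbus_list):
--     odds = modbus_list[1::2]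
--     evens = modbus_list[0::2]
--     return [byte for pair in zip(odds, evens) for byte in pair]
-- ===== Notes on version B (the rewrite author's own statement) =====
-- stated objective: idiomatic
-- what changed: Replaces the index-stepping while loop with two stride-2 slices interleaved via zip (zip truncation drops a trailing odd byte exactly as A's len-1 bound does).
import Mathlib
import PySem

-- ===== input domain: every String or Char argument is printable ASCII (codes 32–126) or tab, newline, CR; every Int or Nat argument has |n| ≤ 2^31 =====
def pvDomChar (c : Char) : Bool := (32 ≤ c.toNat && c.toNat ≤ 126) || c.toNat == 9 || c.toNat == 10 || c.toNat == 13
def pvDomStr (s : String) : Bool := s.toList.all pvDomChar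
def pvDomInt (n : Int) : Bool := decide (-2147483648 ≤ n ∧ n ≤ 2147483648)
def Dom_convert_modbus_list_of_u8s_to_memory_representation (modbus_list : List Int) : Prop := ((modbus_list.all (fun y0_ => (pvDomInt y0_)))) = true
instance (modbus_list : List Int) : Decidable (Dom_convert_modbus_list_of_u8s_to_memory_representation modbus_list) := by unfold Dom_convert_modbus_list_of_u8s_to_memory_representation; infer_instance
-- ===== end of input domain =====

-- B replaces A's index-stepping while loop by two stride-2 slices interleaved with zip (idiomatic; same O(n) cost).


-- ===== PORT A =====
-- the while loop of A; indices this_index and this_index+1 are always in range inside the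
-- loop (the guard gives this_index+1 < len), so .getD 0 never supplies the default
def pvALoop (modbus_list : List Int) (this_index : Nat) (memory_list : List Int) : List Int :=
  if this_index < modbus_list.length - 1 then
    pvALoop modbus_list (this_index + 2)
      (memory_list ++ [(PySem.List.pyGet? modbus_list ((this_index : Int) + 1)).getD 0,
                       (PySem.List.pyGet? modbus_list (this_index : Int)).getD 0])
  else memory_list
termination_by modbus_list.length - this_index

def convert_modbus_list_of_u8s_to_memory_representation (modbus_list : List Int) : List Int :=
  pvALoop modbus_list 0 []

-- ===== PORT B =====
def convert_modbus_list_of_u8s_to_memory_representation_alt (modbus_list : List Int) : List Int :=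
  let odds := (PySem.List.slice? modbus_list (some 1) none 2).getD []
  let evens := (PySem.List.slice? modbus_list (some 0) none 2).getD []
  (odds.zip evens).flatMap (fun pair => [pair.1, pair.2])

-- ===== PRECONDITION & SPEC =====
def Spec_convert_modbus_list_of_u8s_to_memory_representation (modbus_list : List Int) (out : List Int) : Prop := out = convert_modbus_list_of_u8s_to_memory_representation_alt modbus_list
instance (modbus_list : List Int) (out : List Int) : Decidable (Spec_convert_modbus_list_of_u8s_to_memory_representation modbus_list out) := by unfold Spec_convert_modbus_list_of_u8s_to_memory_representation; infer_instance

-- ===== CLAIM (what is proved, stated in full; the proofs are below) =====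
def Claim_equal_convert_modbus_list_of_u8s_to_memory_representation : Prop := ∀ (modbus_list : List Int), Dom_convert_modbus_list_of_u8s_to_memory_representation modbus_list → Spec_convert_modbus_list_of_u8s_to_memory_representation modbus_list (convert_modbus_list_of_u8s_to_memory_representation modbus_list)

-- ===== LEMMAS AND PROOFS =====

-- the common reference function: swap each adjacent pair, drop a trailing odd element
def pvSwapPairs : List Int → List Int
  | [] => []
  | [_] => []
  | a :: b :: t => b :: a :: pvSwapPairs t

-- every-other element (stride-2 selection starting at the head)
def pvEo : List Int → List Int
  | [] => []
  | [x] => [x]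
  | x :: _ :: t => x :: pvEo t

theorem pvEo_spec : (ys : List Int) →
    List.filterMap (fun k => ys[2*k]?) (List.range ((ys.length + 1) / 2)) = pvEo ys
  | [] => by simp [pvEo]
  | [x] => by simp [pvEo, List.range_succ]
  | x :: y :: t => by
      have ih := pvEo_spec t
      have hc : ((x :: y :: t).length + 1) / 2 = (t.length + 1) / 2 + 1 := by
        simp; omega
      rw [hc, List.range_succ_eq_map, List.filterMap_cons, List.filterMap_map]
      have hf : ∀ k : Nat, (x :: y :: t)[2 * (k + 1)]? = t[2 * k]? := by
        intro k
        rw [show 2 * (k + 1) = 2 * k + 1 + 1 from by ring]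
        simp
      simp [pvEo, hf, ih]

theorem pvSlice_zero (xs : List Int) :
    PySem.List.slice? xs (some 0) none 2 = some (pvEo xs) := by
  rw [← pvEo_spec xs]
  simp only [PySem.List.slice?, PySem.List.sliceIndices]
  norm_num
  have h1 : (if 0 < xs.length then (((xs.length : Int) + 2 - 1) / 2).toNat else 0) = (xs.length + 1) / 2 := by
    split <;> omega
  have h2 : ∀ k : Nat, ((2 * (k : Int)).toNat) = 2 * k := by intro k; omega
  rw [h1]
  simp only [h2]

theorem pvSlice_one (xs : List Int) :
    PySem.List.slice? xs (some 1) none 2 = some (pvEo xs.tail) := by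
  cases xs with
  | nil => simp [PySem.List.slice?, PySem.List.sliceIndices, pvEo]
  | cons x t =>
    simp only [List.tail_cons]
    rw [← pvEo_spec t]
    simp only [PySem.List.slice?, PySem.List.sliceIndices]
    norm_num
    have h1 : (if 0 < t.length then (((t.length : Int) + 2 - 1) / 2).toNat else 0) = (t.length + 1) / 2 := by
      split <;> omega
    have h2 : ∀ k : Nat, (x :: t)[((1 : Int) + 2 * (k : Int)).toNat]? = t[2 * k]? := by
      intro k
      rw [show ((1 : Int) + 2 * (k : Int)).toNat = 2 * k + 1 from by omega]
      simp
    rw [h1]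
    simp only [h2]

theorem pvZip_eo : (xs : List Int) →
    (((pvEo xs.tail).zip (pvEo xs)).flatMap (fun pair => [pair.1, pair.2])) = pvSwapPairs xs
  | [] => by simp [pvEo, pvSwapPairs]
  | [a] => by simp [pvEo, pvSwapPairs]
  | [a, b] => by simp [pvEo, pvSwapPairs]
  | a :: b :: c :: t => by
      have ih := pvZip_eo (c :: t)
      simp only [List.tail_cons] at ih ⊢
      simp only [pvEo, pvSwapPairs, List.zip_cons_cons, List.flatMap_cons] at ih ⊢
      simp_all

theorem pvALoop_spec (xs : List Int) (i : Nat) (acc : List Int) :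
    pvALoop xs i acc = acc ++ pvSwapPairs (xs.drop i) := by
  rw [pvALoop]
  split
  · next h =>
    have hi1 : i + 1 < xs.length := by omega
    have hi : i < xs.length := by omega
    have hd : xs.drop i = xs[i] :: xs[i+1] :: xs.drop (i + 2) := by
      rw [List.drop_eq_getElem_cons hi, List.drop_eq_getElem_cons hi1]
    have g1 : (PySem.List.pyGet? xs ((i : Int) + 1)).getD 0 = xs[i+1] := by
      have : ((i : Int) + 1) = ((i + 1 : Nat) : Int) := by push_cast; ring
      rw [this, PySem.List.pyGet?_natCast, List.getElem?_eq_getElem hi1, Option.getD_some]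
    have g0 : (PySem.List.pyGet? xs (i : Int)).getD 0 = xs[i] := by
      rw [PySem.List.pyGet?_natCast, List.getElem?_eq_getElem hi, Option.getD_some]
    rw [pvALoop_spec xs (i + 2), g0, g1, hd, pvSwapPairs]
    simp
  · next h =>
    have : pvSwapPairs (xs.drop i) = [] := by
      have : xs.length - 1 ≤ i := by omega
      match hd : xs.drop i with
      | [] => simp [pvSwapPairs]
      | [z] => simp [pvSwapPairs]
      | z :: w :: r =>
        exfalso
        have := List.length_drop (l := xs) (i := i)
        rw [hd] at this
        simp at this
        omega
    simp [this]
termination_by xs.length - i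

-- ===== VERDICT (by name: the statement is the Claim_ definition above) =====
theorem convert_modbus_list_of_u8s_to_memory_representation_spec : Claim_equal_convert_modbus_list_of_u8s_to_memory_representation := by
  intro xs _
  unfold Spec_convert_modbus_list_of_u8s_to_memory_representation
  unfold convert_modbus_list_of_u8s_to_memory_representation
  unfold convert_modbus_list_of_u8s_to_memory_representation_alt
  rw [pvALoop_spec, pvSlice_zero, pvSlice_one]
  simpa using (pvZip_eo xs).symm
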